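-- pv_equiv track=rewrite | github.com/aligokalpkarakus/UniAlgoLessons | Python/uygulama 11. hafta/alfabe.py | buyuk_harf
-- ===== SOURCE A (Python) =====
-- def buyuk_harf(metin):
--     buyuk_metin = ""
--     for kar in metin:
--         if kar == 'i':
--             buyuk_metin += "İ"
--         else:
--             buyuk_metin += kar.upper()
--     return buyuk_metin
-- ===== SOURCE B (Python) =====
-- def buyuk_harf(metin):
--     return metin.replace('i', 'İ').upper()
-- ===== Notes on version B (the rewrite author's own statement) =====
-- stated objective: faster
-- what changed: Replaces the per-character accumulator loop and branch with a bulk two-pass string-method pipeline: a global replace of the dotted lowercase i followed by .upper(), which the uppercasing leaves intact.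
import Mathlib
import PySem

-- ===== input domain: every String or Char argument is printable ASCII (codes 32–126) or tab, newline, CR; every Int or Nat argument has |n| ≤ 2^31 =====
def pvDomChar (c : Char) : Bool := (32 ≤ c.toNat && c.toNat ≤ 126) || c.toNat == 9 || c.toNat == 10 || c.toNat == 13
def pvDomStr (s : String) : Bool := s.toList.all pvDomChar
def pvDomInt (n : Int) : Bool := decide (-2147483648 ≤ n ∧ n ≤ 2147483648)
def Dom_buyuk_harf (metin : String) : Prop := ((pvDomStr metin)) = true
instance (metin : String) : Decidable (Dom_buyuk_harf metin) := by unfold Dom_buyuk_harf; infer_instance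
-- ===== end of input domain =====

-- B replaces A's per-character accumulator loop by the bulk pipeline replace('i','İ') then .upper() (idiomatic).

-- ===== PORT A =====
-- A: loop over the characters, appending 'İ' for 'i' and kar.upper() otherwise.
def buyuk_harf (metin : String) : String :=
  String.ofList (metin.toList.foldl
    (fun buyuk_metin kar =>
      if kar == 'i' then buyuk_metin ++ ['İ']
      else buyuk_metin ++ [PySem.Chars.upperChar kar])
    [])

-- ===== PORT B =====
def buyuk_harf_alt (metin : String) : String :=
  PySem.Str.upper (PySem.Str.replace metin "i" "İ")

-- ===== PRECONDITION & SPEC =====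
def Spec_buyuk_harf (metin : String) (out : String) : Prop := out = buyuk_harf_alt metin
instance (metin : String) (out : String) : Decidable (Spec_buyuk_harf metin out) := by unfold Spec_buyuk_harf; infer_instance

-- ===== CLAIM (what is proved, stated in full; the proofs are below) =====
def Claim_equal_buyuk_harf : Prop := ∀ (metin : String), Dom_buyuk_harf metin → Spec_buyuk_harf metin (buyuk_harf metin)

-- ===== LEMMAS AND PROOFS =====

-- replace with the single-char pattern ['i'] is the per-character substitution
theorem replace_go_singleton (l acc : List Char) (fuel : Nat) (hf : l.length ≤ fuel) :
    PySem.Chars.replace.go ['i'] ['İ'] fuel l acc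
      = acc.reverse ++ l.flatMap (fun c => if c = 'i' then ['İ'] else [c]) := by
  induction l generalizing fuel acc with
  | nil => cases fuel <;> simp [PySem.Chars.replace.go]
  | cons c t ih =>
    cases fuel with
    | zero => simp at hf
    | succ n =>
      simp only [List.length_cons] at hf
      simp only [PySem.Chars.replace.go]
      by_cases hc : c = 'i'
      · subst hc
        rw [if_pos (by simp [List.isPrefixOf])]
        simp only [List.length_cons, List.drop_succ_cons, List.length_nil, List.drop_zero]
        rw [ih _ _ (by omega)]
        simp
      · have hne : (['i'].isPrefixOf (c :: t)) = false := by
          simp [List.isPrefixOf]; exact fun h => hc h.symm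
        rw [hne]; simp only [Bool.false_eq_true, if_false]
        rw [ih _ _ (by omega)]
        simp [hc]

theorem replace_singleton (s : List Char) :
    PySem.Chars.replace s ['i'] ['İ']
      = s.flatMap (fun c => if c = 'i' then ['İ'] else [c]) := by
  rw [PySem.Chars.replace]
  rw [if_neg (by simp)]
  exact replace_go_singleton s [] s.length le_rfl

-- ===== VERDICT (by name: the statement is the Claim_ definition above) =====
theorem buyuk_harf_spec : Claim_equal_buyuk_harf := by
  intro metin _
  show _ = _
  unfold buyuk_harf buyuk_harf_alt
  rw [PySem.Str.upper]
  congr 1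
  rw [PySem.Str.toList_replace, show "i".toList = ['i'] from rfl,
    show "İ".toList = ['İ'] from rfl, replace_singleton, PySem.Chars.upper,
    List.map_flatMap]
  have hfun : (fun (b : List Char) (kar : Char) =>
      if (kar == 'i') = true then b ++ ['İ'] else b ++ [PySem.Chars.upperChar kar])
      = fun b kar => b ++ (if (kar == 'i') = true then ['İ'] else [PySem.Chars.upperChar kar]) := by
    funext b k; split <;> rfl
  rw [hfun, PySem.List.foldl_append_eq_flatMap]
  simp only [List.nil_append]
  apply List.flatMap_congr
  intro c _
  by_cases hc : c = 'i' <;>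
    simp [hc, PySem.Chars.upperChar, PySem.Chars.islower]
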